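-- pv_equiv track=rewrite | github.com/ZargaZ/fastland-project | main.py | _find_cursor_position
-- ===== SOURCE A (Python) =====
-- def _find_cursor_position(formatted_phone, digits_count):
--     """Находит позицию курсора в отформатированном номере на основе количества цифр"""
--     if digits_count == 0:
--         return 4
--
--     digit_positions = []
--     digit_index = 0
--
--     for i, char in enumerate(formatted_phone):
--         if char.isdigit():
--             digit_positions.append(i)
--             digit_index += 1
--             if digit_index >= digits_count:
--                 return i + 1  # Позиция после текущей цифры
--
--     return len(formatted_phone)  # Если что-то пошло не так, ставим в конец
-- ===== SOURCE B (Python) =====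
-- def _find_cursor_position(formatted_phone, digits_count):
--     """Binary search for the shortest prefix containing digits_count digits."""
--     if digits_count == 0:
--         return 4
--
--     def digits_in_prefix(k):
--         return sum(1 for c in formatted_phone[:k] if c.isdigit())
--
--     n = len(formatted_phone)
--     if digits_in_prefix(n) < digits_count:
--         return n
--     lo, hi = 1, n
--     while lo < hi:
--         mid = (lo + hi) // 2
--         if digits_in_prefix(mid) >= digits_count:
--             hi = mid
--         else:
--             lo = mid + 1
--     return lo
-- ===== Notes on version B (the rewrite author's own statement) =====
-- stated objective: alternative
-- what changed: Replaces A's linear early-exit counting loop by a binary search over prefix lengths for the shortest prefix containing digits_count digits (probing each midpoint with a digits-in-prefix count). Pre_ excludes negative digits_count - outside the function's natural domain (a count of typed digits), where no return value is specified: A exits at the first digit while B's search reports position 1, and neither is more defensible.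
-- outside the precondition, e.g. on _find_cursor_position('a1b2', -1): A returns 2, B returns 1
import Mathlib
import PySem

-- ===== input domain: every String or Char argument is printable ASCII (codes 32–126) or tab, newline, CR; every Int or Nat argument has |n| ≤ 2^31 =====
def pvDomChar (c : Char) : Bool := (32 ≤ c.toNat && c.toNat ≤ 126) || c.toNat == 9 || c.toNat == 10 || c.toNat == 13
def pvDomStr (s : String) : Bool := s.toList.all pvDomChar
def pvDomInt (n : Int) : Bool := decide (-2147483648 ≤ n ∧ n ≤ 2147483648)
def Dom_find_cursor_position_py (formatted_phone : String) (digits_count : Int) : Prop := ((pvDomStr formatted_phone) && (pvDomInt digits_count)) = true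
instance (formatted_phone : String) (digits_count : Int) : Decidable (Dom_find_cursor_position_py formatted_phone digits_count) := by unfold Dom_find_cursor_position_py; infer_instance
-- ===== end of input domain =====

-- B replaces A's linear early-exit counting loop by a binary search over prefix lengths for
-- the shortest prefix containing digits_count digits. Objective: alternative (not faster).

-- ===== PORT A =====
-- A's for-loop over enumerate(formatted_phone): i = current index, idx = digit_index
def pvLoopA (dc n : Int) : List Char → Int → Int → Int
  | [], _, _ => n
  | c :: rest, i, idx =>
    if PySem.Chars.isdigit c then
      if idx + 1 ≥ dc then i + 1
      else pvLoopA dc n rest (i + 1) (idx + 1)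
    else pvLoopA dc n rest (i + 1) idx

def find_cursor_position_py (formatted_phone : String) (digits_count : Int) : Int :=
  if digits_count = 0 then 4
  else pvLoopA digits_count (PySem.Str.len formatted_phone) formatted_phone.toList 0 0

-- ===== PORT B =====
-- digits_in_prefix(k) = sum(1 for c in formatted_phone[:k] if c.isdigit())
def pvDigitsInPrefix (s : List Char) (k : Int) : Int :=
  ((PySem.List.slice s none (some k)).countP (fun c => PySem.Chars.isdigit c) : Int)

-- the while-loop: binary search for the smallest k with digits_in_prefix(k) >= dc
def pvBSearch (s : List Char) (dc : Int) (lo hi : Int) : Int :=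
  if h : lo < hi then
    let mid := PySem.Int.floordiv (lo + hi) 2
    if dc ≤ pvDigitsInPrefix s mid then pvBSearch s dc lo mid
    else pvBSearch s dc (mid + 1) hi
  else lo
termination_by (hi - lo).toNat
decreasing_by
  · have h1 : lo ≤ PySem.Int.floordiv (lo + hi) 2 := by
      rw [PySem.Int.le_floordiv_iff_mul_le (by omega)]; omega
    have h2 : PySem.Int.floordiv (lo + hi) 2 < hi := by
      rw [PySem.Int.floordiv_lt_iff_lt_mul (by omega)]; omega
    omega
  · have h1 : lo ≤ PySem.Int.floordiv (lo + hi) 2 := by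
      rw [PySem.Int.le_floordiv_iff_mul_le (by omega)]; omega
    have h2 : PySem.Int.floordiv (lo + hi) 2 < hi := by
      rw [PySem.Int.floordiv_lt_iff_lt_mul (by omega)]; omega
    omega

def find_cursor_position_py_alt (formatted_phone : String) (digits_count : Int) : Int :=
  if digits_count = 0 then 4
  else
    let s := formatted_phone.toList
    let n := PySem.Str.len formatted_phone
    if pvDigitsInPrefix s n < digits_count then n
    else pvBSearch s digits_count 1 n

-- ===== PRECONDITION & SPEC =====
-- Pre_ excludes negative digits_count — outside the function's natural domain (a count of
-- typed digits), where no return value is specified: A exits at the first digit while B's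
-- binary search reports position 1, and neither is more defensible (A returns values there).
def Pre_find_cursor_position_py (formatted_phone : String) (digits_count : Int) : Prop :=
  0 ≤ digits_count
instance (formatted_phone : String) (digits_count : Int) : Decidable (Pre_find_cursor_position_py formatted_phone digits_count) := by unfold Pre_find_cursor_position_py; infer_instance

def pvWitness_find_cursor_position_py : String × Int := ("+7 (999) 12", 4)

def Spec_find_cursor_position_py (formatted_phone : String) (digits_count : Int) (out : Int) : Prop := out = find_cursor_position_py_alt formatted_phone digits_count
instance (formatted_phone : String) (digits_count : Int) (out : Int) : Decidable (Spec_find_cursor_position_py formatted_phone digits_count out) := by unfold Spec_find_cursor_position_py; infer_instance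

-- ===== CLAIM (what is proved, stated in full; the proofs are below) =====
def Claim_equal_find_cursor_position_py : Prop := ∀ (formatted_phone : String) (digits_count : Int), Dom_find_cursor_position_py formatted_phone digits_count → Pre_find_cursor_position_py formatted_phone digits_count → Spec_find_cursor_position_py formatted_phone digits_count (find_cursor_position_py formatted_phone digits_count)

-- ===== LEMMAS AND PROOFS =====

-- (0-based) index of the dc-th digit of l (meaningful when 1 ≤ dc ≤ number of digits)
def pvFirstIdx : List Char → Int → Int
  | [], _ => 0
  | c :: rest, m =>
    if PySem.Chars.isdigit c then
      if m ≤ 1 then 0 else 1 + pvFirstIdx rest (m - 1)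
    else 1 + pvFirstIdx rest m

theorem pvFirstIdx_nonneg : ∀ (l : List Char) (m : Int), 0 ≤ pvFirstIdx l m := by
  intro l
  induction l with
  | nil => intro m; simp [pvFirstIdx]
  | cons c rest ih =>
    intro m
    simp only [pvFirstIdx]
    split_ifs with h1 h2
    · omega
    · have := ih (m - 1); omega
    · have := ih m; omega

-- A's loop selects i + (index of (dc-idx)-th remaining digit) + 1, or n
theorem pvLoopA_eq (dc n : Int) : ∀ (l : List Char) (i idx : Int), idx + 1 ≤ dc →
    pvLoopA dc n l i idx =
      if dc - idx ≤ (l.countP (fun c => PySem.Chars.isdigit c) : Int) then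
        i + pvFirstIdx l (dc - idx) + 1
      else n
  | [], i, idx, h => by
    simp only [pvLoopA, List.countP_nil]
    rw [if_neg (by push_cast; omega)]
  | c :: rest, i, idx, h => by
    by_cases hd : PySem.Chars.isdigit c
    · by_cases he : idx + 1 ≥ dc
      · have h1 : dc - idx = 1 := by omega
        simp [pvLoopA, hd, he, pvFirstIdx, h1]
      · have hrec := pvLoopA_eq dc n rest (i + 1) (idx + 1) (by omega)
        simp only [pvLoopA, hd, if_true, he, if_false, hrec, List.countP_cons]
        have hm : ¬ (dc - idx ≤ 1) := by omega
        by_cases hle : dc - (idx + 1) ≤ (rest.countP (fun c => PySem.Chars.isdigit c) : Int)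
        · rw [if_pos hle, if_pos (by push_cast at hle ⊢; omega)]
          simp only [pvFirstIdx, hd, if_true, if_neg hm]
          have : dc - (idx + 1) = dc - idx - 1 := by omega
          rw [this]; ring
        · rw [if_neg hle, if_neg (by push_cast at hle ⊢; omega)]
    · have hrec := pvLoopA_eq dc n rest (i + 1) idx h
      have hstep : pvLoopA dc n (c :: rest) i idx = pvLoopA dc n rest (i + 1) idx := by
        simp [pvLoopA, hd]
      have hfi : pvFirstIdx (c :: rest) (dc - idx) = 1 + pvFirstIdx rest (dc - idx) := by
        simp [pvFirstIdx, hd]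
      have hcp : (((c :: rest).countP (fun c => PySem.Chars.isdigit c) : Int)) =
          (rest.countP (fun c => PySem.Chars.isdigit c) : Int) := by
        simp [hd]
      rw [hstep, hrec, hcp, hfi]
      by_cases hle : dc - idx ≤ (rest.countP (fun c => PySem.Chars.isdigit c) : Int)
      · rw [if_pos hle, if_pos hle]; ring
      · rw [if_neg hle, if_neg hle]

-- prefix digit count as countP of take
theorem pvDigitsInPrefix_eq (s : List Char) (k : Int) (hk : 0 ≤ k) :
    pvDigitsInPrefix s k = ((s.take k.toNat).countP (fun c => PySem.Chars.isdigit c) : Int) := by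
  unfold pvDigitsInPrefix
  rw [PySem.List.slice_to s hk]

theorem pvDigitsInPrefix_mono (s : List Char) {j k : Int} (hj : 0 ≤ j) (h : j ≤ k) :
    pvDigitsInPrefix s j ≤ pvDigitsInPrefix s k := by
  rw [pvDigitsInPrefix_eq s j hj, pvDigitsInPrefix_eq s k (by omega)]
  have h1 : j.toNat ≤ k.toNat := by omega
  have h2 : s.take j.toNat = (s.take k.toNat).take j.toNat := by
    rw [List.take_take, Nat.min_eq_left h1]
  rw [h2]
  exact_mod_cast (List.take_sublist _ _).countP_le

theorem pvDigitsInPrefix_zero (s : List Char) : pvDigitsInPrefix s 0 = 0 := by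
  rw [pvDigitsInPrefix_eq s 0 le_rfl]; simp

theorem pvDigitsInPrefix_len (s : List Char) :
    pvDigitsInPrefix s (s.length : Int) = (s.countP (fun c => PySem.Chars.isdigit c) : Int) := by
  rw [pvDigitsInPrefix_eq s _ (by positivity)]
  simp

-- the bracket property of pvFirstIdx: prefix of length (firstIdx + 1) has exactly m digits,
-- prefix of length firstIdx has m - 1
theorem pvFirstIdx_bracket : ∀ (l : List Char) (m : Int), 1 ≤ m →
    m ≤ (l.countP (fun c => PySem.Chars.isdigit c) : Int) →
    pvDigitsInPrefix l (pvFirstIdx l m) = m - 1 ∧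
    pvDigitsInPrefix l (pvFirstIdx l m + 1) = m ∧
    pvFirstIdx l m + 1 ≤ (l.length : Int) := by
  intro l
  induction l with
  | nil => intro m h1 h2; simp at h2; omega
  | cons c rest ih =>
    intro m h1 h2
    simp only [List.countP_cons] at h2
    by_cases hd : PySem.Chars.isdigit c
    · by_cases hm : m ≤ 1
      · have hm1 : m = 1 := by omega
        simp only [pvFirstIdx, hd, if_true, if_pos hm]
        refine ⟨by rw [pvDigitsInPrefix_zero]; omega, ?_, by simp⟩
        rw [pvDigitsInPrefix_eq _ _ (by omega), hm1]
        simp [List.countP_cons, hd]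
      · have hrec := ih (m - 1) (by omega) (by simp [hd] at h2; push_cast at h2 ⊢; omega)
        have hf := pvFirstIdx_nonneg rest (m - 1)
        simp only [pvFirstIdx, hd, if_true, if_neg hm]
        have e1 : pvDigitsInPrefix (c :: rest) (1 + pvFirstIdx rest (m - 1)) =
            1 + pvDigitsInPrefix rest (pvFirstIdx rest (m - 1)) := by
          rw [pvDigitsInPrefix_eq _ _ (by omega), pvDigitsInPrefix_eq _ _ hf]
          have : (1 + pvFirstIdx rest (m - 1)).toNat = (pvFirstIdx rest (m - 1)).toNat + 1 := by omega
          rw [this, List.take_succ_cons]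
          simp [List.countP_cons, hd]
          push_cast; omega
        have e2 : pvDigitsInPrefix (c :: rest) (1 + pvFirstIdx rest (m - 1) + 1) =
            1 + pvDigitsInPrefix rest (pvFirstIdx rest (m - 1) + 1) := by
          rw [pvDigitsInPrefix_eq _ _ (by omega), pvDigitsInPrefix_eq _ _ (by omega)]
          have : (1 + pvFirstIdx rest (m - 1) + 1).toNat = (pvFirstIdx rest (m - 1) + 1).toNat + 1 := by omega
          rw [this, List.take_succ_cons]
          simp [List.countP_cons, hd]
          push_cast; omega
        refine ⟨by rw [e1, hrec.1]; ring, by rw [e2, hrec.2.1]; ring, by simp; omega⟩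
    · have hrec := ih m h1 (by simp [hd] at h2; push_cast at h2 ⊢; omega)
      have hf := pvFirstIdx_nonneg rest m
      rw [show pvFirstIdx (c :: rest) m = 1 + pvFirstIdx rest m from by simp [pvFirstIdx, hd]]
      have e1 : pvDigitsInPrefix (c :: rest) (1 + pvFirstIdx rest m) =
          pvDigitsInPrefix rest (pvFirstIdx rest m) := by
        rw [pvDigitsInPrefix_eq _ _ (by omega), pvDigitsInPrefix_eq _ _ hf]
        have : (1 + pvFirstIdx rest m).toNat = (pvFirstIdx rest m).toNat + 1 := by omega
        rw [this, List.take_succ_cons, List.countP_cons]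
        simp [hd]
      have e2 : pvDigitsInPrefix (c :: rest) (1 + pvFirstIdx rest m + 1) =
          pvDigitsInPrefix rest (pvFirstIdx rest m + 1) := by
        rw [pvDigitsInPrefix_eq _ _ (by omega), pvDigitsInPrefix_eq _ _ (by omega)]
        have : (1 + pvFirstIdx rest m + 1).toNat = (pvFirstIdx rest m + 1).toNat + 1 := by omega
        rw [this, List.take_succ_cons, List.countP_cons]
        simp [hd]
      exact ⟨by rw [e1, hrec.1], by rw [e2, hrec.2.1], by simp; omega⟩

-- binary-search invariant: the result keeps the bracket dcnt(r-1) < dc ≤ dcnt(r)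
theorem pvBSearch_spec (s : List Char) (dc : Int) : ∀ (lo hi : Int), lo ≤ hi →
    pvDigitsInPrefix s (lo - 1) < dc → dc ≤ pvDigitsInPrefix s hi →
    lo ≤ pvBSearch s dc lo hi ∧ pvBSearch s dc lo hi ≤ hi ∧
    pvDigitsInPrefix s (pvBSearch s dc lo hi - 1) < dc ∧
    dc ≤ pvDigitsInPrefix s (pvBSearch s dc lo hi) := by
  intro lo hi
  induction hn : (hi - lo).toNat using Nat.strong_induction_on generalizing lo hi with
  | _ n ih =>
    intro hle hlo hhi
    by_cases h : lo < hi
    · have h1 : lo ≤ PySem.Int.floordiv (lo + hi) 2 := by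
        rw [PySem.Int.le_floordiv_iff_mul_le (by omega)]; omega
      have h2 : PySem.Int.floordiv (lo + hi) 2 < hi := by
        rw [PySem.Int.floordiv_lt_iff_lt_mul (by omega)]; omega
      rw [pvBSearch, dif_pos h]
      set mid := PySem.Int.floordiv (lo + hi) 2 with hmid
      by_cases hc : dc ≤ pvDigitsInPrefix s mid
      · rw [if_pos hc]
        have := ih (mid - lo).toNat (by omega) lo mid rfl h1 hlo hc
        exact ⟨this.1, by omega, this.2.2⟩
      · rw [if_neg hc]
        have := ih (hi - (mid + 1)).toNat (by omega) (mid + 1) hi rfl (by omega)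
          (by rw [add_sub_cancel_right]; exact not_le.mp hc) hhi
        exact ⟨by omega, this.2.1, this.2.2⟩
    · rw [pvBSearch, dif_neg h]
      have : lo = hi := by omega
      exact ⟨le_rfl, by omega, hlo, this ▸ hhi⟩

-- ===== VERDICT (by name: the statement is the Claim_ definition above) =====
theorem find_cursor_position_py_spec : Claim_equal_find_cursor_position_py := by
  intro ph dc _ hpre
  unfold Spec_find_cursor_position_py find_cursor_position_py find_cursor_position_py_alt
  by_cases h0 : dc = 0
  · simp [h0]
  · have h1 : 1 ≤ dc := by unfold Pre_find_cursor_position_py at hpre; omega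
    rw [if_neg h0, if_neg h0]
    set s := ph.toList with hs
    have hlen : PySem.Str.len ph = (s.length : Int) := by simp [PySem.Str.len_eq, hs]
    rw [pvLoopA_eq dc (PySem.Str.len ph) s 0 0 (by omega)]
    simp only [sub_zero, zero_add]
    by_cases hle : dc ≤ (s.countP (fun c => PySem.Chars.isdigit c) : Int)
    · rw [if_pos hle]
      have hguard : ¬ (pvDigitsInPrefix s (PySem.Str.len ph) < dc) := by
        rw [hlen, pvDigitsInPrefix_len]; omega
      rw [if_neg hguard]
      -- both equal the unique bracket point
      obtain ⟨hb1, hb2, hb3⟩ := pvFirstIdx_bracket s dc h1 hle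
      have hf0 := pvFirstIdx_nonneg s dc
      have hslen : 1 ≤ (s.length : Int) := by omega
      have hbs := pvBSearch_spec s dc 1 (PySem.Str.len ph) (by omega)
        (by norm_num [pvDigitsInPrefix_zero]; omega)
        (by rw [hlen, pvDigitsInPrefix_len]; exact hle)
      set r := pvBSearch s dc 1 (PySem.Str.len ph) with hr
      set t := pvFirstIdx s dc + 1 with ht
      -- uniqueness: both r and t satisfy dcnt(x-1) < dc ≤ dcnt(x); monotonicity forces r = t
      by_contra hne
      rcases lt_or_gt_of_ne (fun he => hne he.symm) with hlt | hgt
      · have := pvDigitsInPrefix_mono s (by omega) (show r ≤ t - 1 by omega)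
        have : dc ≤ pvDigitsInPrefix s (t - 1) := by omega
        simp only [ht, add_sub_cancel_right] at this
        omega
      · have := pvDigitsInPrefix_mono s (by omega) (show t ≤ r - 1 by omega)
        omega
    · rw [if_neg hle]
      have hguard : pvDigitsInPrefix s (PySem.Str.len ph) < dc := by
        rw [hlen, pvDigitsInPrefix_len]; omega
      rw [if_pos hguard]
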